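-- pv_equiv track=rewrite | github.com/fncnt/azodesign | azoarcus/pseudoknots.py | hc_from_db
-- ===== SOURCE A (Python) =====
-- def hc_from_db(structure):
--     constraint = structure
--     pk_free = structure
--
--     for bracket in "[{<]}>":
--         constraint = constraint.replace(bracket, "x")
--         pk_free = pk_free.replace(bracket, ".")
--
--     for paren in "()":
--         constraint = constraint.replace(paren, ".")
--
--     if not "x" in constraint:
--         constraint = None
--
--     return pk_free, constraint
-- ===== SOURCE B (Python) =====
-- PK_MAP = {'[': '.', '{': '.', '<': '.', ']': '.', '}': '.', '>': '.'}
-- C_MAP = {'[': 'x', '{': 'x', '<': 'x', ']': 'x', '}': 'x', '>': 'x', '(': '.', ')': '.'}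
--
--
-- def hc_from_db(structure):
--     pk_chars = []
--     c_chars = []
--     for ch in structure:
--         pk_chars.append(PK_MAP.get(ch, ch))
--         c_chars.append(C_MAP.get(ch, ch))
--     pk_free = "".join(pk_chars)
--     constraint = "".join(c_chars)
--     if "x" not in constraint:
--         constraint = None
--     return pk_free, constraint
-- ===== Notes on version B (the rewrite author's own statement) =====
-- stated objective: alternative
-- what changed: Replaces eight whole-string str.replace passes by a single pass over the characters with two lookup tables building both output strings at once; same O(n) work, different structure (CPython's C-level replace makes A faster in practice).
import Mathlib
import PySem

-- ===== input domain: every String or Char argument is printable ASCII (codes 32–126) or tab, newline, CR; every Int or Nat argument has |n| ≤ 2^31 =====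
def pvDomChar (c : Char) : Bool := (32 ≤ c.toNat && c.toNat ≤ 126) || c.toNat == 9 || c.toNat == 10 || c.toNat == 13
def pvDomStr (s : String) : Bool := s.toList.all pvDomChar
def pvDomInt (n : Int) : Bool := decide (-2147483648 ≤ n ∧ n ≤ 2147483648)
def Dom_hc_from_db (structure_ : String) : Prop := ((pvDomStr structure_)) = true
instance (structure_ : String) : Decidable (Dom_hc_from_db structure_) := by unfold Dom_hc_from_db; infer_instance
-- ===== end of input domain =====

set_option maxHeartbeats 1000000


-- B replaces A's eight whole-string replace passes by a single pass over the characters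
-- with two lookup tables, building both output strings at once (alternative decomposition, not claimed faster).

-- ===== PORT A =====
def hc_from_db (structure_ : String) : String × Option String :=
  let constraint0 := structure_
  let pk_free0 := structure_
  let p :=
    ("[{<]}>".toList).foldl
      (fun (st : String × String) bracket =>
        (PySem.Str.replace st.1 (String.ofList [bracket]) "x",
         PySem.Str.replace st.2 (String.ofList [bracket]) "."))
      (constraint0, pk_free0)
  let constraint :=
    ("()".toList).foldl
      (fun c paren => PySem.Str.replace c (String.ofList [paren]) ".") p.1
  if PySem.Str.isIn "x" constraint then (p.2, some constraint) else (p.2, none)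

-- ===== PORT B =====
def pvPkMap : PySem.Dict Char Char :=
  PySem.Dict.ofList [('[', '.'), ('{', '.'), ('<', '.'), (']', '.'), ('}', '.'), ('>', '.')]

def pvCMap : PySem.Dict Char Char :=
  PySem.Dict.ofList [('[', 'x'), ('{', 'x'), ('<', 'x'), (']', 'x'), ('}', 'x'), ('>', 'x'),
                     ('(', '.'), (')', '.')]

/-- the single pass of Source B: build both character lists at once -/
def hc_go : List Char → List Char × List Char
  | [] => ([], [])
  | c :: t =>
    let r := hc_go t
    (PySem.Dict.getD pvPkMap c c :: r.1, PySem.Dict.getD pvCMap c c :: r.2)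

def hc_from_db_alt (structure_ : String) : String × Option String :=
  let r := hc_go structure_.toList
  let pk_free := String.ofList r.1
  let constraint := String.ofList r.2
  if PySem.Str.isIn "x" constraint then (pk_free, some constraint) else (pk_free, none)

-- ===== PRECONDITION & SPEC =====
def Spec_hc_from_db (structure_ : String) (out : String × Option String) : Prop := out = hc_from_db_alt structure_
instance (structure_ : String) (out : String × Option String) : Decidable (Spec_hc_from_db structure_ out) := by unfold Spec_hc_from_db; infer_instance

-- ===== CLAIM (what is proved, stated in full; the proofs are below) =====
def Claim_equal_hc_from_db : Prop := ∀ (structure_ : String), Dom_hc_from_db structure_ → Spec_hc_from_db structure_ (hc_from_db structure_)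

-- ===== LEMMAS AND PROOFS =====

theorem go_single (o n : Char) :
    ∀ (fuel : Nat) (l acc : List Char), l.length ≤ fuel →
      PySem.Chars.replace.go [o] [n] fuel l acc
        = acc.reverse ++ l.map (fun c => if c = o then n else c) := by
  intro fuel
  induction fuel with
  | zero =>
    intro l acc h
    have : l = [] := List.eq_nil_of_length_eq_zero (Nat.le_zero.mp h)
    subst this
    simp [PySem.Chars.replace.go]
  | succ k ih =>
    intro l acc h
    cases l with
    | nil => simp [PySem.Chars.replace.go]
    | cons c t =>
      by_cases hc : c = o
      · subst hc
        have hp : List.isPrefixOf [c] (c :: t) = true := by simp [List.isPrefixOf]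
        simp only [PySem.Chars.replace.go, hp, if_pos]
        rw [ih _ _ (by simpa using Nat.le_of_succ_le_succ h)]
        simp
      · have hp : List.isPrefixOf [o] (c :: t) = false := by
          simp [List.isPrefixOf, Ne.symm hc]
        simp only [PySem.Chars.replace.go, hp]
        rw [if_neg (by simp)]
        rw [ih _ _ (by simpa using Nat.le_of_succ_le_succ h)]
        simp [hc]

/-- Python's single-character `str.replace` is a character map. -/
theorem replace_single (s : List Char) (o n : Char) :
    PySem.Chars.replace s [o] [n] = s.map (fun c => if c = o then n else c) := by
  rw [PySem.Chars.replace]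
  simp [go_single o n s.length s [] (le_refl _)]

/-- B's single pass is a pair of character maps. -/
theorem hc_go_eq (s : List Char) :
    hc_go s = (s.map (fun c => PySem.Dict.getD pvPkMap c c),
               s.map (fun c => PySem.Dict.getD pvCMap c c)) := by
  induction s with
  | nil => rfl
  | cons c t ih => simp [hc_go, ih]

/-- A's eight constraint replaces compose to B's constraint lookup table. -/
theorem cA_toList (s : String) :
    (PySem.Str.replace (PySem.Str.replace
      (PySem.Str.replace (PySem.Str.replace (PySem.Str.replace (PySem.Str.replace
        (PySem.Str.replace (PySem.Str.replace s (String.ofList ['[']) "x")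
          (String.ofList ['{']) "x") (String.ofList ['<']) "x") (String.ofList [']']) "x")
          (String.ofList ['}']) "x") (String.ofList ['>']) "x")
      (String.ofList ['(']) ".") (String.ofList [')']) ".").toList
    = s.toList.map (fun c => PySem.Dict.getD pvCMap c c) := by
  have hx : ("x" : String).toList = ['x'] := by decide
  have hd : ("." : String).toList = ['.'] := by decide
  have hm : pvCMap = PySem.Dict.mk [('[', 'x'), ('{', 'x'), ('<', 'x'), (']', 'x'), ('}', 'x'), ('>', 'x'), ('(', '.'), (')', '.')] := by decide
  simp only [PySem.Str.toList_replace, String.toList_ofList, hx, hd,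
    replace_single, List.map_map]
  apply List.map_congr_left
  intro c _
  by_cases h1 : c = '[' ; · subst h1; decide
  by_cases h2 : c = '{' ; · subst h2; decide
  by_cases h3 : c = '<' ; · subst h3; decide
  by_cases h4 : c = ']' ; · subst h4; decide
  by_cases h5 : c = '}' ; · subst h5; decide
  by_cases h6 : c = '>' ; · subst h6; decide
  by_cases h7 : c = '(' ; · subst h7; decide
  by_cases h8 : c = ')' ; · subst h8; decide
  simp [Function.comp, hm, PySem.Dict.getD, h1, h2, h3, h4, h5, h6, h7, h8,
    Ne.symm h1, Ne.symm h2, Ne.symm h3, Ne.symm h4, Ne.symm h5, Ne.symm h6,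
    Ne.symm h7, Ne.symm h8, PySem.Dict.get?]

/-- A's six pk_free replaces compose to B's pk_free lookup table. -/
theorem pkA_toList (s : String) :
    (PySem.Str.replace (PySem.Str.replace (PySem.Str.replace (PySem.Str.replace
      (PySem.Str.replace (PySem.Str.replace s (String.ofList ['[']) ".")
        (String.ofList ['{']) ".") (String.ofList ['<']) ".") (String.ofList [']']) ".")
        (String.ofList ['}']) ".") (String.ofList ['>']) ".").toList
    = s.toList.map (fun c => PySem.Dict.getD pvPkMap c c) := by
  have hd : ("." : String).toList = ['.'] := by decide
  have hm : pvPkMap = PySem.Dict.mk [('[', '.'), ('{', '.'), ('<', '.'), (']', '.'), ('}', '.'), ('>', '.')] := by decide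
  simp only [PySem.Str.toList_replace, String.toList_ofList, hd,
    replace_single, List.map_map]
  apply List.map_congr_left
  intro c _
  by_cases h1 : c = '[' ; · subst h1; decide
  by_cases h2 : c = '{' ; · subst h2; decide
  by_cases h3 : c = '<' ; · subst h3; decide
  by_cases h4 : c = ']' ; · subst h4; decide
  by_cases h5 : c = '}' ; · subst h5; decide
  by_cases h6 : c = '>' ; · subst h6; decide
  simp [Function.comp, hm, PySem.Dict.getD, h1, h2, h3, h4, h5, h6,
    Ne.symm h1, Ne.symm h2, Ne.symm h3, Ne.symm h4, Ne.symm h5, Ne.symm h6,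
    PySem.Dict.get?]

theorem cA_str (s : String) :
    PySem.Str.replace (PySem.Str.replace
      (PySem.Str.replace (PySem.Str.replace (PySem.Str.replace (PySem.Str.replace
        (PySem.Str.replace (PySem.Str.replace s (String.ofList ['[']) "x")
          (String.ofList ['{']) "x") (String.ofList ['<']) "x") (String.ofList [']']) "x")
          (String.ofList ['}']) "x") (String.ofList ['>']) "x")
      (String.ofList ['(']) ".") (String.ofList [')']) "."
    = String.ofList (s.toList.map (fun c => PySem.Dict.getD pvCMap c c)) :=
  String.toList_injective (by rw [cA_toList]; simp)

theorem pkA_str (s : String) :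
    PySem.Str.replace (PySem.Str.replace (PySem.Str.replace (PySem.Str.replace
      (PySem.Str.replace (PySem.Str.replace s (String.ofList ['[']) ".")
        (String.ofList ['{']) ".") (String.ofList ['<']) ".") (String.ofList [']']) ".")
        (String.ofList ['}']) ".") (String.ofList ['>']) "."
    = String.ofList (s.toList.map (fun c => PySem.Dict.getD pvPkMap c c)) :=
  String.toList_injective (by rw [pkA_toList]; simp)

-- ===== VERDICT (by name: the statement is the Claim_ definition above) =====
theorem hc_from_db_spec : Claim_equal_hc_from_db := by
  intro s _
  unfold Spec_hc_from_db hc_from_db hc_from_db_alt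
  simp only [show ("[{<]}>".toList) = ['[', '{', '<', ']', '}', '>'] by decide,
    show ("()".toList) = ['(', ')'] by decide, List.foldl, hc_go_eq, cA_str, pkA_str]
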